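-- pv_equiv track=rewrite | github.com/Spatchat-org/spatchat-sdm | app.py | _normalize_method_name
-- ===== SOURCE A (Python) =====
-- MODEL_METHODS = {
--     "logistic_regression": {
--         "label": "Logistic Regression SDM",
--         "aliases": ("logistic", "logistic regression", "glm", "default"),
--     },
--     "issa": {
--         "label": "Integrated Step Selection Analysis (iSSA)",
--         "aliases": ("issa", "iSSA", "integrated step selection", "step selection"),
--     },
-- }
--
-- def _normalize_method_name(raw):
--     text = str(raw or "").strip().lower()
--     if not text:
--         return None
--     for key, spec in MODEL_METHODS.items():
--         if text == key or text in {a.lower() for a in spec.get("aliases", ())}: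
--             return key
--     return None
-- ===== SOURCE B (Python) =====
-- MODEL_METHODS = {
--     "logistic_regression": {
--         "label": "Logistic Regression SDM",
--         "aliases": ("logistic", "logistic regression", "glm", "default"),
--     },
--     "issa": {
--         "label": "Integrated Step Selection Analysis (iSSA)",
--         "aliases": ("issa", "iSSA", "integrated step selection", "step selection"),
--     },
-- }
--
-- def _build_lookup():
--     table = {}
--     for key, spec in MODEL_METHODS.items():
--         table.setdefault(key, key)
--         for alias in spec.get("aliases", ()):
--             table.setdefault(alias.lower(), key)
--     return table
--
-- _LOOKUP = _build_lookup()
--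
-- def _normalize_method_name(raw):
--     text = str(raw or "").strip().lower()
--     if not text:
--         return None
--     return _LOOKUP.get(text)
-- ===== Notes on version B (the rewrite author's own statement) =====
-- stated objective: idiomatic
-- what changed: B builds a flat alias->canonical-key dict once at module load and answers each query with normalize + a single dict lookup, instead of A's per-query scan over MODEL_METHODS rebuilding a lowered alias set for each method.
import Mathlib
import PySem

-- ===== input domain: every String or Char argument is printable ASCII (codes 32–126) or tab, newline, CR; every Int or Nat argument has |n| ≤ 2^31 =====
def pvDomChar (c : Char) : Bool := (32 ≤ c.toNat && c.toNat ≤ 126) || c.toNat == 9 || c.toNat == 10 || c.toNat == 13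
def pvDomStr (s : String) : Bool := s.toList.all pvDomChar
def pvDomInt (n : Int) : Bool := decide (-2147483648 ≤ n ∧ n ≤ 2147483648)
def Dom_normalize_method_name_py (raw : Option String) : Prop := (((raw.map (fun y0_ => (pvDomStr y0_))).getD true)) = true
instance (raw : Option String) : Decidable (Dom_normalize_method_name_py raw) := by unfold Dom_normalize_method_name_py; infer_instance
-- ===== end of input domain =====

-- B replaces A's per-method scan with a flat lookup table built once (idiomatic); same return values.

-- ===== PORT A =====
-- MODEL_METHODS as (key, aliases) items, in insertion order (labels are unused by the function).
def pvMethodsA : List (String × List String) :=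
  [("logistic_regression", ["logistic", "logistic regression", "glm", "default"]),
   ("issa", ["issa", "iSSA", "integrated step selection", "step selection"])]

-- the 'for key, spec in MODEL_METHODS.items()' loop
def pvLoopA (text : String) : List (String × List String) → Option String
  | [] => none
  | (key, aliases) :: rest =>
    if text == key || PySem.Set.contains (PySem.Set.ofList (aliases.map PySem.Str.lower)) text then
      some key
    else pvLoopA text rest

def normalize_method_name_py (raw : Option String) : Option String :=
  let text := PySem.Str.lower (PySem.Str.strip (raw.getD ""))  -- str(raw or "").strip().lower()
  if text == "" then none
  else pvLoopA text pvMethodsA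

-- ===== PORT B =====
def pvMethodsB : List (String × List String) :=
  [("logistic_regression", ["logistic", "logistic regression", "glm", "default"]),
   ("issa", ["issa", "iSSA", "integrated step selection", "step selection"])]

-- table.setdefault(k, v)
def pvSetdefault (d : PySem.Dict String String) (k v : String) : PySem.Dict String String :=
  if (d.get? k).isSome then d else d.insert k v

-- _build_lookup(): one pass over MODEL_METHODS filling a flat alias→key table (first insertion wins)
def pvBuildLookup (methods : List (String × List String)) : PySem.Dict String String :=
  methods.foldl
    (fun table kv =>
      kv.2.foldl (fun d a => pvSetdefault d (PySem.Str.lower a) kv.1)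
        (pvSetdefault table kv.1 kv.1))
    PySem.Dict.empty

-- _LOOKUP, built once at module level
def pvLookup : PySem.Dict String String := pvBuildLookup pvMethodsB

def normalize_method_name_py_alt (raw : Option String) : Option String :=
  let text := PySem.Str.lower (PySem.Str.strip (raw.getD ""))
  if text == "" then none
  else (pvLookup).get? text

-- ===== PRECONDITION & SPEC =====
def Spec_normalize_method_name_py (raw : Option String) (out : Option String) : Prop := out = normalize_method_name_py_alt raw
instance (raw : Option String) (out : Option String) : Decidable (Spec_normalize_method_name_py raw out) := by unfold Spec_normalize_method_name_py; infer_instance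

-- ===== CLAIM (what is proved, stated in full; the proofs are below) =====
def Claim_equal_normalize_method_name_py : Prop := ∀ (raw : Option String), Dom_normalize_method_name_py raw → Spec_normalize_method_name_py raw (normalize_method_name_py raw)

-- ===== LEMMAS AND PROOFS =====

-- core fact: A's per-method scan over pvMethodsA returns exactly what B's flat table lookup returns
set_option maxHeartbeats 1000000 in
theorem pvMain (t : String) : pvLoopA t pvMethodsA = pvLookup.get? t := by
  have hL : pvLookup = PySem.Dict.mk
    [("logistic_regression","logistic_regression"),("logistic","logistic_regression"),
     ("logistic regression","logistic_regression"),("glm","logistic_regression"),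
     ("default","logistic_regression"),("issa","issa"),
     ("integrated step selection","issa"),("step selection","issa")] := by decide
  have m1 : PySem.Set.ofList ((["logistic", "logistic regression", "glm", "default"]).map PySem.Str.lower)
      = ["logistic", "logistic regression", "glm", "default"] := by decide
  have m2 : PySem.Set.ofList ((["issa", "iSSA", "integrated step selection", "step selection"]).map PySem.Str.lower)
      = ["issa", "integrated step selection", "step selection"] := by decide
  rw [hL]
  simp only [pvMethodsA, pvLoopA, m1, m2, PySem.Dict.get?_mk_cons, PySem.Set.contains]
  simp only [List.contains_cons, List.contains_nil, beq_iff_eq, Bool.or_eq_true]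
  split_ifs <;> (try subst_vars) <;> simp_all [eq_comm, PySem.Dict.get?]

-- ===== VERDICT (by name: the statement is the Claim_ definition above) =====
theorem normalize_method_name_py_spec : Claim_equal_normalize_method_name_py := by
  intro raw _
  show normalize_method_name_py raw = normalize_method_name_py_alt raw
  simp only [normalize_method_name_py, normalize_method_name_py_alt]
  split
  · rfl
  · exact pvMain _
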